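-- pv_equiv track=rewrite | github.com/MaxKryev/- | Calculator.py | validation_operator
-- ===== SOURCE A (Python) =====
-- class IncorrectInputException(Exception):
--     pass
--
-- def validation_operator(string: str) -> str:
--     operator_counter = 0
--     operator = None
--     for elem in string:
--         if elem in ['+', '/', '-', '*']:
--             operator_counter += 1
--             operator = elem
--     if operator_counter == 0:
--         raise IncorrectInputException('throws Exception //т.к. строка не является математической операцией')
--     elif operator_counter != 1:
--         raise IncorrectInputException('throws Exception //т.к. формат математической операции не удовлетворяет заданию - два операнда и один оператор (+, -, /, *)')
--     return operator
-- ===== SOURCE B (Python) =====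
-- class IncorrectInputException(Exception):
--     pass
--
-- def validation_operator(string: str) -> str:
--     counts = {op: string.count(op) for op in '+-*/'}
--     total = sum(counts.values())
--     if total == 0:
--         raise IncorrectInputException('throws Exception //т.к. строка не является математической операцией')
--     if total != 1:
--         raise IncorrectInputException('throws Exception //т.к. формат математической операции не удовлетворяет заданию - два операнда и один оператор (+, -, /, *)')
--     return next(op for op, c in counts.items() if c == 1)
-- ===== Notes on version B (the rewrite author's own statement) =====
-- stated objective: idiomatic
-- what changed: Replaces the manual per-character loop with per-operator counting via string.count: a dict mapping each of the four operators to its count, total = their sum decides the two error branches, and the unique operator is picked as the one whose count is 1.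
import Mathlib
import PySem

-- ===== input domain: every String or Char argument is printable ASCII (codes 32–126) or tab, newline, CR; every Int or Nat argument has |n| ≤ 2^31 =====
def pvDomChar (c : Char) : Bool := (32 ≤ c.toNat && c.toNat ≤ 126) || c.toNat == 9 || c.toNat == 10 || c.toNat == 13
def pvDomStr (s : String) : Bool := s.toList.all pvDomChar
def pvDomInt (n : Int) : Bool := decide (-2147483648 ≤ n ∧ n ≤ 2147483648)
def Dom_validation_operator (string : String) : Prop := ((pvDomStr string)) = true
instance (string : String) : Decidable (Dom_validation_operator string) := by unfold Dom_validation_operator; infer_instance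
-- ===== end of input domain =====

-- B replaces A's single character-scan loop with per-operator counting (one string.count per
-- operator); equivalence claimed on strings containing exactly one operator (elsewhere A raises).


-- ===== PORT A =====
-- `elem in ['+', '/', '-', '*']`
def pvIsOp (elem : Char) : Bool := ['+', '/', '-', '*'].contains elem

-- A's loop body: `if elem in [...]: operator_counter += 1; operator = elem`
def vaStep (st : Int × Option Char) (elem : Char) : Int × Option Char :=
  if pvIsOp elem then (st.1 + 1, some elem) else st

def validation_operator (string : String) : String :=
  let r := string.toList.foldl vaStep ((0 : Int), (none : Option Char))
  if r.1 = 0 then ""            -- Python raises IncorrectInputException here (outside Pre_)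
  else if r.1 ≠ 1 then ""       -- Python raises IncorrectInputException here (outside Pre_)
  else match r.2 with
       | some c => String.ofList [c]
       | none => ""

-- ===== PORT B =====
def validation_operator_alt (string : String) : String :=
  let counts : List (Char × Int) :=
    "+-*/".toList.map (fun op => (op, (PySem.Str.count string (String.ofList [op]) : Int)))
  let total : Int := (counts.map (·.2)).sum
  if total = 0 then ""          -- Python raises IncorrectInputException here (outside Pre_)
  else if total ≠ 1 then ""     -- Python raises IncorrectInputException here (outside Pre_)
  else match counts.find? (fun p => p.2 == 1) with
       | some p => String.ofList [p.1]
       | none => ""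

-- ===== PRECONDITION & SPEC =====
-- A raises IncorrectInputException unless the string contains exactly one operator character.
def Pre_validation_operator (string : String) : Prop :=
  string.toList.countP pvIsOp = 1
instance (string : String) : Decidable (Pre_validation_operator string) := by
  unfold Pre_validation_operator; infer_instance

def pvWitness_validation_operator : String := "2+3"

def Spec_validation_operator (string : String) (out : String) : Prop := out = validation_operator_alt string
instance (string : String) (out : String) : Decidable (Spec_validation_operator string out) := by unfold Spec_validation_operator; infer_instance

-- ===== CLAIM (what is proved, stated in full; the proofs are below) =====
def Claim_equal_validation_operator : Prop := ∀ (string : String), Dom_validation_operator string → Pre_validation_operator string → Spec_validation_operator string (validation_operator string)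

-- ===== LEMMAS AND PROOFS =====

-- a list with exactly one operator splits as pre ++ c :: suf with operator-free pre and suf
theorem pv_decomp (l : List Char) (h : l.countP pvIsOp = 1) :
    ∃ pre c suf, l = pre ++ c :: suf ∧ pvIsOp c = true ∧
      (∀ x ∈ pre, pvIsOp x = false) ∧ (∀ x ∈ suf, pvIsOp x = false) := by
  induction l with
  | nil => simp at h
  | cons a t ih =>
    by_cases ha : pvIsOp a = true
    · refine ⟨[], a, t, rfl, ha, by simp, ?_⟩
      simpa [ha] using h
    · have ht : t.countP pvIsOp = 1 := by
        have ha' : pvIsOp a = false := by revert ha; cases pvIsOp a <;> simp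
        simpa [List.countP_cons, ha'] using h
      obtain ⟨pre, c, suf, hl, hc, hp, hs⟩ := ih ht
      refine ⟨a :: pre, c, suf, by simp [hl], hc, ?_, hs⟩
      intro x hx
      rcases List.mem_cons.mp hx with hx | hx
      · subst hx; revert ha; cases pvIsOp x <;> simp
      · exact hp x hx

theorem pv_foldl_noop (l : List Char) (h : ∀ x ∈ l, pvIsOp x = false)
    (st : Int × Option Char) : l.foldl vaStep st = st := by
  induction l generalizing st with
  | nil => rfl
  | cons a t ih =>
    have ha : pvIsOp a = false := h a List.mem_cons_self
    simp only [List.foldl_cons, vaStep, ha, Bool.false_eq_true, if_false]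
    exact ih (fun x hx => h x (List.mem_cons_of_mem a hx)) st

theorem pv_foldl_A (pre suf : List Char) (c : Char) (hc : pvIsOp c = true)
    (hp : ∀ x ∈ pre, pvIsOp x = false) (hs : ∀ x ∈ suf, pvIsOp x = false) :
    (pre ++ c :: suf).foldl vaStep ((0 : Int), (none : Option Char)) = (1, some c) := by
  rw [List.foldl_append, pv_foldl_noop pre hp]
  simp only [List.foldl_cons, vaStep, hc, if_true]
  exact pv_foldl_noop suf hs _

-- PySem.Chars.count with a single-character needle is List.count
theorem pv_go_single (c : Char) (s : List Char) :
    ∀ acc, PySem.Chars.count.go [c] s.length s acc = acc + s.count c := by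
  induction s with
  | nil => intro acc; simp [PySem.Chars.count.go]
  | cons h t ih =>
    intro acc
    simp only [List.length_cons, PySem.Chars.count.go]
    by_cases hc : c = h
    · subst hc
      simp [List.isPrefixOf, ih]
      omega
    · simp [List.isPrefixOf, hc, ih, Ne.symm hc]

theorem pv_count_single (c : Char) (s : List Char) :
    PySem.Chars.count s [c] = s.count c := by
  simp [PySem.Chars.count, pv_go_single]

theorem pv_count_op (pre suf : List Char) (c op : Char)
    (hp : ∀ x ∈ pre, pvIsOp x = false) (hs : ∀ x ∈ suf, pvIsOp x = false)
    (hop : pvIsOp op = true) :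
    (pre ++ c :: suf).count op = if op = c then 1 else 0 := by
  have hzero : ∀ (l : List Char), (∀ x ∈ l, pvIsOp x = false) → l.count op = 0 := by
    intro l hl
    rw [List.count_eq_zero]
    intro hmem
    have := hl op hmem
    rw [hop] at this
    exact absurd this (by simp)
  simp [List.count_append, List.count_cons, hzero pre hp, hzero suf hs]
  by_cases h : op = c <;> simp [h, Ne.symm]

-- ===== VERDICT (by name: the statement is the Claim_ definition above) =====
theorem validation_operator_spec : Claim_equal_validation_operator := by
  intro string _ hpre
  unfold Spec_validation_operator
  obtain ⟨pre, c, suf, hl, hc, hp, hs⟩ := pv_decomp string.toList hpre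
  have hA : validation_operator string = String.ofList [c] := by
    simp only [validation_operator, hl, pv_foldl_A pre suf c hc hp hs]
    norm_num
  have hcount : ∀ op, pvIsOp op = true →
      (PySem.Str.count string (String.ofList [op]) : Int) = if op = c then 1 else 0 := by
    intro op hop
    rw [PySem.Str.count_eq]
    have hto : (String.ofList [op]).toList = [op] := by simp
    rw [hto, pv_count_single, hl, pv_count_op pre suf c op hp hs hop]
    by_cases h : op = c <;> simp [h]
  have hops : "+-*/".toList = ['+', '-', '*', '/'] := rfl
  have hc4 : c = '+' ∨ c = '/' ∨ c = '-' ∨ c = '*' := by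
    simp [pvIsOp] at hc
    tauto
  have h1 := hcount '+' (by decide)
  have h2 := hcount '-' (by decide)
  have h3 := hcount '*' (by decide)
  have h4 := hcount '/' (by decide)
  rcases hc4 with h | h | h | h <;> subst h <;> rw [hA] <;>
    simp only [validation_operator_alt, hops, List.map_cons, List.map_nil,
      h1, h2, h3, h4] <;> decide
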